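-- pv_equiv track=rewrite | github.com/yingyulou/tmp | reversi.py | enclosing
-- ===== SOURCE A (Python) =====
-- def enclosing(board, player, pos, direct):
--
--     midNum, tarNum = (1, 2) if player == 2 else (2, 1)
--     (nowRow, nowCol), (dirRow, dirCol) = pos, direct
--
--     nowRow += dirRow
--     nowCol += dirCol
--
--     # If 1 2 1 etc.
--     midBool = False
--
--     while 0 <= nowRow <= 7 and 0 <= nowCol <= 7:
--
--         if board[nowRow][nowCol] == 0:
--             break
--         elif board[nowRow][nowCol] == midNum:
--             midBool = True
--         else:
--             if midBool:
--                 return True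
--             else:
--                 break
--
--         nowRow += dirRow
--         nowCol += dirCol
--
--     return False
-- ===== SOURCE B (Python) =====
-- def enclosing(board, player, pos, direct):
--     mid = 1 if player == 2 else 2
--     (r, c), (dr, dc) = pos, direct
--     # collect the ray of cell values starting one step away, until leaving the board
--     ray = []
--     for k in range(1, 9):
--         rr, cc = r + k * dr, c + k * dc
--         if not (0 <= rr <= 7 and 0 <= cc <= 7):
--             break
--         ray.append(board[rr][cc])
--     # length of the leading run of opponent pieces
--     run = 0
--     while run < len(ray) and ray[run] == mid:
--         run += 1
--     return 1 <= run < len(ray) and ray[run] != 0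
-- ===== Notes on version B (the rewrite author's own statement) =====
-- stated objective: alternative
-- what changed: B first materialises the ray of at most 8 cell values in the move's direction, then measures the leading run of opponent pieces and decides with one post-loop condition (run>=1 and the cell after the run is non-empty), instead of A's single walk with a midBool flag and a three-way branch with break/return inside the loop.
-- outside the precondition, e.g. on enclosing([[0], [0], [0], [0], [0], [0], [0], [0]], 1, (0, 0), (1, 0)): A returns False, B returns False; on enclosing([[5], [0]], 1, (0, 0), (1, 0)): A returns False, B raises IndexError
import Mathlib
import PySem

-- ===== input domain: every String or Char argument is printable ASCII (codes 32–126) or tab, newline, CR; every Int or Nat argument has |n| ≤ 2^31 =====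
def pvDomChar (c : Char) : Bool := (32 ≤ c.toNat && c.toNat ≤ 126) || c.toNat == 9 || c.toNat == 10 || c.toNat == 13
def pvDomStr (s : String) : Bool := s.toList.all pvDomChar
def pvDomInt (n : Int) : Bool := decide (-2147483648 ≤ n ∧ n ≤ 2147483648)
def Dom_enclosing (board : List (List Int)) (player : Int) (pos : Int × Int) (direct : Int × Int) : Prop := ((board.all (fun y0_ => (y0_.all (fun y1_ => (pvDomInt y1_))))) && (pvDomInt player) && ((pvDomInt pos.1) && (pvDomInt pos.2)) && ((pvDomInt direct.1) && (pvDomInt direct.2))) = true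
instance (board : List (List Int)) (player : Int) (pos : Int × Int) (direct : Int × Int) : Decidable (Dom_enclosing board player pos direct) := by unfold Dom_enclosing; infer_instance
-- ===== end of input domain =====

-- B materialises the ray of at most 8 cells in the move's direction, then decides with a
-- leading-run count and one post-loop condition, instead of A's walk with a midBool flag
-- and a three-way in-loop branch (objective: alternative decomposition, same cost).


-- shared primitive: the `0 <= row <= 7 and 0 <= col <= 7` bounds test
def pvInb (r c : Int) : Bool := decide (0 ≤ r ∧ r ≤ 7 ∧ 0 ≤ c ∧ c ≤ 7)

-- shared primitive: `board[r][c]` (none = IndexError)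
def pvCell (board : List (List Int)) (r c : Int) : Option Int :=
  (PySem.List.pyGet? board r).bind (fun row => PySem.List.pyGet? row c)

-- ===== PORT A =====
-- A's while loop; fuel 9 covers every terminating run of the Python loop
-- (with a nonzero direction at most 8 in-bounds positions exist, the 9th check leaves the board).
def pvLoopA (board : List (List Int)) (midNum dr dc : Int) : Nat → Int → Int → Bool → Bool
  | 0, _, _, _ => false
  | fuel + 1, r, c, mb =>
    if pvInb r c then
      match pvCell board r c with
      | none => false          -- Python raises IndexError here (excluded by Pre_)
      | some v =>
        if v = 0 then false
        else if v = midNum then pvLoopA board midNum dr dc fuel (r + dr) (c + dc) true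
        else if mb then true else false
    else false

def enclosing (board : List (List Int)) (player : Int) (pos : Int × Int) (direct : Int × Int) : Bool :=
  let mt : Int × Int := if player = 2 then (1, 2) else (2, 1)
  let midNum := mt.1
  pvLoopA board midNum direct.1 direct.2 9 (pos.1 + direct.1) (pos.2 + direct.2) false

-- ===== PORT B =====
-- B's ray-building for loop over range(1, 9), with its two breaks
def pvRay (board : List (List Int)) (r c dr dc : Int) : List Int → List Int
  | [] => []
  | k :: ks =>
    let rr := r + k * dr
    let cc := c + k * dc
    if pvInb rr cc then
      match pvCell board rr cc with
      | some v => v :: pvRay board r c dr dc ks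
      | none => []             -- Python raises IndexError here (excluded by Pre_)
    else []

-- B's `while run < len(ray) and ray[run] == mid: run += 1`
def pvRun (mid : Int) : List Int → Nat
  | [] => 0
  | v :: vs => if v = mid then pvRun mid vs + 1 else 0

def enclosing_alt (board : List (List Int)) (player : Int) (pos : Int × Int) (direct : Int × Int) : Bool :=
  let mid : Int := if player = 2 then 1 else 2
  let ray := pvRay board pos.1 pos.2 direct.1 direct.2 (PySem.List.pyRange 1 9 1)
  let run := pvRun mid ray
  if 1 ≤ run ∧ run < ray.length then decide (ray.getD run 0 ≠ 0) else false

-- ===== PRECONDITION & SPEC =====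
-- Pre_ excludes (a) boards other than 8×8 whenever the first stepped square is in range
-- (A's 0..7 bounds check can then index past a short row or past the board and raise IndexError;
-- on some such boards A still happens to return before reaching a missing cell — those are
-- excluded too, see the cites), and (b) the degenerate direction (0,0) aimed at an opponent
-- piece, on which A loops forever.
def Pre_enclosing (board : List (List Int)) (player : Int) (pos : Int × Int) (direct : Int × Int) : Prop :=
  (pvInb (pos.1 + direct.1) (pos.2 + direct.2) = true →
    board.length = 8 ∧ ∀ row ∈ board, row.length = 8) ∧
  (direct = (0, 0) → pvInb (pos.1 + direct.1) (pos.2 + direct.2) = true →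
    pvCell board (pos.1 + direct.1) (pos.2 + direct.2) ≠ some (if player = 2 then 1 else 2))
instance (board : List (List Int)) (player : Int) (pos : Int × Int) (direct : Int × Int) : Decidable (Pre_enclosing board player pos direct) := by unfold Pre_enclosing; infer_instance

def pvWitness_enclosing : List (List Int) × Int × (Int × Int) × (Int × Int) :=
  ([[0,0,0,0,0,0,0,0],[0,0,0,0,0,0,0,0],[0,0,0,0,0,0,0,0],[0,0,0,2,1,0,0,0],
    [0,0,0,1,2,0,0,0],[0,0,0,0,0,0,0,0],[0,0,0,0,0,0,0,0],[0,0,0,0,0,0,0,0]],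
   1, (3, 2), (0, 1))

def Spec_enclosing (board : List (List Int)) (player : Int) (pos : Int × Int) (direct : Int × Int) (out : Bool) : Prop := out = enclosing_alt board player pos direct
instance (board : List (List Int)) (player : Int) (pos : Int × Int) (direct : Int × Int) (out : Bool) : Decidable (Spec_enclosing board player pos direct out) := by unfold Spec_enclosing; infer_instance

-- ===== CLAIM (what is proved, stated in full; the proofs are below) =====
def Claim_equal_enclosing : Prop := ∀ (board : List (List Int)) (player : Int) (pos : Int × Int) (direct : Int × Int), Dom_enclosing board player pos direct → Pre_enclosing board player pos direct → Spec_enclosing board player pos direct (enclosing board player pos direct)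

-- ===== LEMMAS AND PROOFS =====

-- the common "answer of the remaining ray given the midBool flag" function both sides reduce to
def pvAns (mid : Int) : List Int → Bool → Bool
  | [], _ => false
  | v :: vs, mb => if v = 0 then false else if v = mid then pvAns mid vs true else mb

-- consecutive integer indices k, k+1, …, k+n-1
def pvKs (k : Int) : Nat → List Int
  | 0 => []
  | n + 1 => k :: pvKs (k + 1) n

-- B's run/post-check equals pvAns with the flag already set
theorem pvRunTrue (mid : Int) (hm : mid ≠ 0) : ∀ vs : List Int,
    (if pvRun mid vs < vs.length then decide (vs.getD (pvRun mid vs) 0 ≠ 0) else false)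
      = pvAns mid vs true := by
  intro vs
  induction vs with
  | nil => simp [pvRun, pvAns]
  | cons v vs ih =>
    by_cases hv : v = mid
    · rw [hv]
      simp only [pvRun, pvAns, if_pos rfl, if_neg hm, List.length_cons, Nat.add_lt_add_iff_right]
      rw [← ih]
      by_cases hlt : pvRun mid vs < vs.length <;> simp [hlt, List.getD]
    · simp only [pvRun, pvAns, if_neg hv, List.length_cons]
      by_cases h0 : v = 0 <;> simp [h0, hv, List.getD]

-- B's full result equals pvAns with the flag initially false
theorem pvRunFalse (mid : Int) (hm : mid ≠ 0) : ∀ vs : List Int,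
    (if 1 ≤ pvRun mid vs ∧ pvRun mid vs < vs.length then decide (vs.getD (pvRun mid vs) 0 ≠ 0) else false)
      = pvAns mid vs false := by
  intro vs
  cases vs with
  | nil => simp [pvRun, pvAns]
  | cons v vs =>
    by_cases hv : v = mid
    · rw [hv]
      simp only [pvRun, pvAns, if_pos rfl, if_neg hm, List.length_cons, Nat.add_lt_add_iff_right,
        Nat.le_add_left, true_and]
      rw [← pvRunTrue mid hm vs]
      by_cases hlt : pvRun mid vs < vs.length <;> simp [hlt, List.getD]
    · by_cases h0 : v = 0
      · rw [h0] at hv ⊢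
        simp [pvRun, pvAns, hv]
      · simp [pvRun, pvAns, hv, h0]

-- with a nonzero direction, 8 consecutive in-bounds squares force the 9th off the board
theorem pvOob (dr dc pr pc : Int) (hd : ¬ (dr = 0 ∧ dc = 0)) :
    (∀ j : Int, 1 ≤ j → j < 9 → pvInb (pr + j * dr) (pc + j * dc) = true) →
    pvInb (pr + 9 * dr) (pc + 9 * dc) = false := by
  intro h
  have h1 := h 1 (by norm_num) (by norm_num)
  have h8 := h 8 (by norm_num) (by norm_num)
  simp only [pvInb, decide_eq_true_eq, decide_eq_false_iff_not] at h1 h8 ⊢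
  omega

-- A's walk from square k equals pvAns over B's ray from index k, provided that whenever all n
-- listed squares are in bounds, the square after them is not
theorem pvKeyA (board : List (List Int)) (mid dr dc pr pc : Int) :
    ∀ (n : Nat) (k : Int) (mb : Bool),
      ((∀ j : Int, k ≤ j → j < k + n → pvInb (pr + j * dr) (pc + j * dc) = true) →
        pvInb (pr + (k + n) * dr) (pc + (k + n) * dc) = false) →
      pvLoopA board mid dr dc (n + 1) (pr + k * dr) (pc + k * dc) mb
        = pvAns mid (pvRay board pr pc dr dc (pvKs k n)) mb := by
  intro n
  induction n with
  | zero =>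
    intro k mb H
    have h0 : pvInb (pr + k * dr) (pc + k * dc) = false := by
      have := H (by intro j hj1 hj2; exfalso; push_cast at hj2; omega)
      simpa using this
    simp [pvKs, pvRay, pvAns, pvLoopA, h0]
  | succ n ih =>
    intro k mb H
    show pvLoopA board mid dr dc (n + 1 + 1) (pr + k * dr) (pc + k * dc) mb
        = pvAns mid (pvRay board pr pc dr dc (k :: pvKs (k + 1) n)) mb
    by_cases hb : pvInb (pr + k * dr) (pc + k * dc) = true
    · cases hc : pvCell board (pr + k * dr) (pc + k * dc) with
      | none => simp [pvLoopA, pvRay, hb, hc, pvAns]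
      | some v =>
        by_cases h0 : v = 0
        · rw [h0] at hc
          simp [pvLoopA, pvRay, pvAns, hb, hc]
        · by_cases hvm : v = mid
          · rw [hvm] at hc h0
            have har : pr + k * dr + dr = pr + (k + 1) * dr := by ring
            have hac : pc + k * dc + dc = pc + (k + 1) * dc := by ring
            have H' : (∀ j : Int, k + 1 ≤ j → j < (k + 1) + (n : Int) → pvInb (pr + j * dr) (pc + j * dc) = true) →
                pvInb (pr + ((k + 1) + (n : Int)) * dr) (pc + ((k + 1) + (n : Int)) * dc) = false := by
              intro hall
              have hstep := H (by
                intro j hj1 hj2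
                rcases eq_or_lt_of_le hj1 with hj | hj
                · rw [← hj]; exact hb
                · exact hall j (by omega) (by push_cast at hj2 ⊢; omega))
              have he : k + (((n : Nat) + 1 : Nat) : Int) = (k + 1) + (n : Int) := by push_cast; ring
              rw [he] at hstep
              exact hstep
            have lhs : pvLoopA board mid dr dc (n + 1 + 1) (pr + k * dr) (pc + k * dc) mb
                = pvLoopA board mid dr dc (n + 1) (pr + (k + 1) * dr) (pc + (k + 1) * dc) true := by
              simp [pvLoopA, hb, hc, h0, har, hac]
            rw [lhs, ih (k + 1) true H']
            simp [pvRay, pvAns, hb, hc, h0]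
          · have hlhs : pvLoopA board mid dr dc (n + 1 + 1) (pr + k * dr) (pc + k * dc) mb
                = (if mb then true else false) := by
              simp [pvLoopA, hb, hc, h0, hvm]
            rw [hlhs]
            have hrhs : pvAns mid (pvRay board pr pc dr dc (k :: pvKs (k + 1) n)) mb = mb := by
              simp [pvRay, pvAns, hb, hc, h0, hvm]
            rw [hrhs]
            cases mb <;> simp
    · have hb' : pvInb (pr + k * dr) (pc + k * dc) = false := by
        cases h : pvInb (pr + k * dr) (pc + k * dc) <;> simp_all
      simp [pvLoopA, pvRay, pvAns, hb']

-- the whole bridge, for a fixed opponent number mid ∈ {1, 2}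
theorem pvBridge (board : List (List Int)) (dr dc pr pc mid : Int) (hm : mid ≠ 0)
    (hzero : dr = 0 → dc = 0 → pvInb (pr + dr) (pc + dc) = true →
      pvCell board (pr + dr) (pc + dc) ≠ some mid) :
    pvLoopA board mid dr dc 9 (pr + dr) (pc + dc) false
      = (if 1 ≤ pvRun mid (pvRay board pr pc dr dc (PySem.List.pyRange 1 9 1)) ∧
            pvRun mid (pvRay board pr pc dr dc (PySem.List.pyRange 1 9 1))
              < (pvRay board pr pc dr dc (PySem.List.pyRange 1 9 1)).length
         then decide ((pvRay board pr pc dr dc (PySem.List.pyRange 1 9 1)).getD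
              (pvRun mid (pvRay board pr pc dr dc (PySem.List.pyRange 1 9 1))) 0 ≠ 0)
         else false) := by
  have hrange : PySem.List.pyRange 1 9 1 = pvKs 1 8 := by decide
  rw [hrange, pvRunFalse mid hm]
  by_cases hd : dr = 0 ∧ dc = 0
  · obtain ⟨hd1, hd2⟩ := hd
    have hz2 : pvInb (pr + dr) (pc + dc) = true → pvCell board (pr + dr) (pc + dc) ≠ some mid :=
      hzero hd1 hd2
    subst hd1; subst hd2
    simp only [add_zero] at hz2 ⊢
    cases hb : pvInb pr pc with
    | false => simp [pvLoopA, pvRay, pvAns, pvKs, hb, mul_zero, add_zero]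
    | true =>
      cases hc : pvCell board pr pc with
      | none => simp [pvLoopA, pvRay, pvAns, pvKs, hb, hc, mul_zero, add_zero]
      | some v =>
        have hvm : v ≠ mid := by
          intro hv
          exact hz2 hb (by rw [hc, hv])
        by_cases h0 : v = 0
        · rw [h0] at hc
          simp [pvLoopA, pvRay, pvAns, pvKs, hb, hc, mul_zero, add_zero]
        · simp [pvLoopA, pvRay, pvAns, pvKs, hb, hc, h0, hvm, mul_zero, add_zero]
  · have h1 : pr + dr = pr + 1 * dr := by ring
    have h2 : pc + dc = pc + 1 * dc := by ring
    rw [h1, h2]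
    refine pvKeyA board mid dr dc pr pc 8 1 false ?_
    intro hall
    have h9 := pvOob dr dc pr pc hd (by
      intro j hj1 hj2
      exact hall j hj1 (by push_cast; omega))
    have he : (1 : Int) + ((8 : Nat) : Int) = 9 := by norm_num
    rw [he]
    exact h9

theorem pvMain (board : List (List Int)) (player : Int) (pos : Int × Int) (direct : Int × Int)
    (hpre : Pre_enclosing board player pos direct) :
    enclosing board player pos direct = enclosing_alt board player pos direct := by
  obtain ⟨-, hz⟩ := hpre
  have hz' : direct.1 = 0 → direct.2 = 0 →
      pvInb (pos.1 + direct.1) (pos.2 + direct.2) = true →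
      pvCell board (pos.1 + direct.1) (pos.2 + direct.2) ≠ some (if player = 2 then 1 else 2) := by
    intro a b hbnd
    have hdir : direct = (0, 0) := by
      cases direct
      simp_all
    exact hz hdir hbnd
  by_cases hp : player = 2
  · simp only [enclosing, enclosing_alt, hp, if_pos rfl] at *
    exact pvBridge board direct.1 direct.2 pos.1 pos.2 1 (by norm_num) (by
      intro a b hbnd
      have := hz' a b hbnd
      simpa [hp] using this)
  · simp only [enclosing, enclosing_alt, if_neg hp] at *
    exact pvBridge board direct.1 direct.2 pos.1 pos.2 2 (by norm_num) (by
      intro a b hbnd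
      have := hz' a b hbnd
      simpa [hp] using this)

-- ===== VERDICT (by name: the statement is the Claim_ definition above) =====
theorem enclosing_spec : Claim_equal_enclosing := by
  intro board player pos direct _ hpre
  unfold Spec_enclosing
  exact pvMain board player pos direct hpre
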